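-- pv_equiv track=rewrite | github.com/IndupriyaVempati/Autonotex-Project | server/agents/notes_agent.py | _split_content_sections
-- ===== SOURCE A (Python) =====
-- import math
--
-- def _split_content_sections(content: str) -> list:
--     sections = []
--     current_title = "Section 1"
--     current_lines = []
--
--     for line in content.splitlines():
--         stripped = line.strip()
--         if stripped.startswith("--- ") and stripped.endswith(" ---") and len(stripped) <= 160:
--             if current_lines:
--                 sections.append((current_title, "\n".join(current_lines).strip()))
--             current_title = stripped.strip("-").strip()
--             current_lines = []
--             continue
--         current_lines.append(line)
--
--     if current_lines:
--         sections.append((current_title, "\n".join(current_lines).strip()))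
--
--     if not sections:
--         return []
--
--     max_sections = 60
--     if len(sections) <= max_sections:
--         return sections
--
--     group_size = int(math.ceil(len(sections) / max_sections))
--     grouped = []
--     for start in range(0, len(sections), group_size):
--         chunk = sections[start:start + group_size]
--         title = f"Sections {start + 1}-{start + len(chunk)}"
--         text = "\n\n".join([c[1] for c in chunk])
--         grouped.append((title, text))
--     return grouped
-- ===== SOURCE B (Python) =====
-- import math
--
--
-- def _split_content_sections(content: str) -> list:
--     lines = content.splitlines()
--
--     def is_header(line):
--         s = line.strip()
--         return s.startswith("--- ") and s.endswith(" ---") and len(s) <= 160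
--
--     def title_of(line):
--         return line.strip().strip("-").strip()
--
--     # Block-splitting: repeatedly scan to the next header line, slice the body
--     # out in one piece, and continue after the header.
--     sections = []
--     title = "Section 1"
--     rest = lines
--     while True:
--         i = 0
--         while i < len(rest) and not is_header(rest[i]):
--             i += 1
--         body = rest[:i]
--         if body:
--             sections.append((title, "\n".join(body).strip()))
--         if i == len(rest):
--             break
--         title = title_of(rest[i])
--         rest = rest[i + 1:]
--
--     if not sections:
--         return []
--
--     max_sections = 60
--     if len(sections) <= max_sections:
--         return sections
--
--     group_size = int(math.ceil(len(sections) / max_sections))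
--     grouped = []
--     for start in range(0, len(sections), group_size):
--         chunk = sections[start:start + group_size]
--         title = f"Sections {start + 1}-{start + len(chunk)}"
--         text = "\n\n".join([c[1] for c in chunk])
--         grouped.append((title, text))
--     return grouped
-- ===== Notes on version B (the rewrite author's own statement) =====
-- stated objective: alternative
-- what changed: Replaces A's streaming per-line accumulate-and-flush pass with a block-splitting loop that scans ahead to the next header line and slices each section body out whole (the max_sections/ceil grouping tail is unchanged).
import Mathlib
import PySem

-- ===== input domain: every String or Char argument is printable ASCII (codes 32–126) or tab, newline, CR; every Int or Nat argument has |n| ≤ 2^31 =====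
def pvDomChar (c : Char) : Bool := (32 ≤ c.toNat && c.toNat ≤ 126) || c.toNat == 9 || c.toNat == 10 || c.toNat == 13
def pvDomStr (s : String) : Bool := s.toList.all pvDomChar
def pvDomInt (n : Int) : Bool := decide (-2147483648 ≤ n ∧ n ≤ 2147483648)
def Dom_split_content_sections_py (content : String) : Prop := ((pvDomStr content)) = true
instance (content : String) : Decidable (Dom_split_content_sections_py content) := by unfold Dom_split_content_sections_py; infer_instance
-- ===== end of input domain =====

-- B replaces A's streaming accumulate-and-flush pass with a block-splitting loop that
-- scans to the next header and slices each body out whole (objective: alternative).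

-- ===== PORT A =====
-- stripped header test, shared shape of A's condition
def pvIsHeader (line : String) : Bool :=
  let stripped := PySem.Str.strip line
  PySem.Str.startswith stripped "--- " && PySem.Str.endswith stripped " ---" &&
    decide (PySem.Str.len stripped ≤ 160)

def pvTitleOf (line : String) : String :=
  PySem.Str.strip (PySem.Str.stripChars (PySem.Str.strip line) "-")

def pvJoinStrip (ls : List String) : String :=
  PySem.Str.strip (PySem.Str.join "\n" ls)

-- A's loop body: state (sections, current_title, current_lines)
def pvStepA (st : List (String × String) × String × List String) (line : String) :
    List (String × String) × String × List String :=
  let (sections, title, cur) := st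
  if pvIsHeader line then
    (if cur = [] then sections else sections ++ [(title, pvJoinStrip cur)], pvTitleOf line, [])
  else
    (sections, title, cur ++ [line])

-- the final 'if current_lines:' flush after the loop
def pvFlushA (st : List (String × String) × String × List String) : List (String × String) :=
  let (sections, title, cur) := st
  if cur = [] then sections else sections ++ [(title, pvJoinStrip cur)]

-- the tail of A: empty check, max_sections=60 cap, ceil grouping
-- (int(math.ceil(n/60)) ported as exact integer ceiling division, exact for list lengths)
def pvFinishA (sections : List (String × String)) : List (String × String) :=
  if sections = [] then []
  else if PySem.List.len sections ≤ 60 then sections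
  else
    let n : Int := PySem.List.len sections
    let g : Int := -(PySem.Int.floordiv (-n) 60)
    (PySem.List.pyRange 0 n g).foldl
      (fun grouped start =>
        let chunk := PySem.List.slice sections (some start) (some (start + g))
        grouped ++ [("Sections " ++ PySem.Int.toStr (start + 1) ++ "-" ++
                       PySem.Int.toStr (start + PySem.List.len chunk),
                     PySem.Str.join "\n\n" (chunk.map (fun c => c.2)))]) []

def split_content_sections_py (content : String) : List (String × String) :=
  pvFinishA (pvFlushA ((PySem.Str.splitlines content).foldl pvStepA ([], "Section 1", [])))

-- ===== PORT B =====
-- Source B's inner 'while i < len(rest) and not is_header(rest[i]): i += 1'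
def pvNextHeaderB : List String → Nat
  | [] => 0
  | l :: tl => if pvIsHeader l then 0 else pvNextHeaderB tl + 1

theorem pvNextHeaderB_le (ls : List String) : pvNextHeaderB ls ≤ ls.length := by
  induction ls with
  | nil => simp [pvNextHeaderB]
  | cons l tl ih => simp only [pvNextHeaderB]; split <;> simp <;> omega

-- Source B's outer 'while True' loop, state (title, rest, sections);
-- rest[:i] = rest.take i and rest[i+1:] = rest.drop (i+1) (nonnegative in-range slices)
def pvSplitB (title : String) (rest : List String) (sections : List (String × String)) :
    List (String × String) :=
  let i := pvNextHeaderB rest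
  let sections' := if rest.take i = [] then sections else sections ++ [(title, pvJoinStrip (rest.take i))]
  if i = rest.length then sections'
  else pvSplitB (pvTitleOf (PySem.List.pyGetD rest (i : Int) "")) (rest.drop (i + 1)) sections'
termination_by rest.length
decreasing_by
  have := pvNextHeaderB_le rest
  simp_all [List.length_drop]; omega

-- the same tail as A (Source B repeats the grouping block verbatim)
def pvFinishB (sections : List (String × String)) : List (String × String) :=
  if sections = [] then []
  else if PySem.List.len sections ≤ 60 then sections
  else
    let n : Int := PySem.List.len sections
    let g : Int := -(PySem.Int.floordiv (-n) 60)
    (PySem.List.pyRange 0 n g).foldl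
      (fun grouped start =>
        let chunk := PySem.List.slice sections (some start) (some (start + g))
        grouped ++ [("Sections " ++ PySem.Int.toStr (start + 1) ++ "-" ++
                       PySem.Int.toStr (start + PySem.List.len chunk),
                     PySem.Str.join "\n\n" (chunk.map (fun c => c.2)))]) []

def split_content_sections_py_alt (content : String) : List (String × String) :=
  pvFinishB (pvSplitB "Section 1" (PySem.Str.splitlines content) [])

-- ===== PRECONDITION & SPEC =====
def Spec_split_content_sections_py (content : String) (out : List (String × String)) : Prop := out = split_content_sections_py_alt content
instance (content : String) (out : List (String × String)) : Decidable (Spec_split_content_sections_py content out) := by unfold Spec_split_content_sections_py; infer_instance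

-- ===== CLAIM (what is proved, stated in full; the proofs are below) =====
def Claim_equal_split_content_sections_py : Prop := ∀ (content : String), Dom_split_content_sections_py content → Spec_split_content_sections_py content (split_content_sections_py content)

-- ===== LEMMAS AND PROOFS =====

theorem pvNextHeaderB_of_no_header (c : List String) (hc : ∀ l ∈ c, pvIsHeader l = false) :
    pvNextHeaderB c = c.length := by
  induction c with
  | nil => rfl
  | cons l tl ih =>
    simp only [pvNextHeaderB, hc l (by simp), Bool.false_eq_true, if_false, List.length_cons,
      ih (fun x hx => hc x (by simp [hx]))]

theorem pvNextHeaderB_append_header (c : List String) (l : String) (rest : List String)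
    (hc : ∀ x ∈ c, pvIsHeader x = false) (hl : pvIsHeader l = true) :
    pvNextHeaderB (c ++ l :: rest) = c.length := by
  induction c with
  | nil => simp [pvNextHeaderB, hl]
  | cons a tl ih =>
    simp only [List.cons_append, pvNextHeaderB, hc a (by simp), Bool.false_eq_true, if_false,
      List.length_cons, ih (fun x hx => hc x (by simp [hx]))]

-- the heart: A's fold with header-free pending lines c equals B's block loop on c ++ lines
theorem pvLoop_eq (lines : List String) : ∀ (t : String) (c : List String)
    (s : List (String × String)), (∀ l ∈ c, pvIsHeader l = false) →
    pvFlushA (lines.foldl pvStepA (s, t, c)) = pvSplitB t (c ++ lines) s := by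
  induction lines with
  | nil =>
    intro t c s hc
    rw [pvSplitB]
    simp only [List.append_nil, List.foldl_nil,
      pvNextHeaderB_of_no_header c hc, List.take_length]
    rfl
  | cons l rest ih =>
    intro t c s hc
    by_cases hl : pvIsHeader l = true
    · have hkey : pvNextHeaderB (c ++ l :: rest) = c.length :=
        pvNextHeaderB_append_header c l rest hc hl
      rw [pvSplitB]
      simp only [hkey]
      have htake : (c ++ l :: rest).take c.length = c := by
        simp
      have hlen : c.length ≠ (c ++ l :: rest).length := by simp
      have hget : PySem.List.pyGetD (c ++ l :: rest) (c.length : Int) "" = l := by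
        rw [PySem.List.pyGetD_natCast]
        simp [List.getD]
      have hdrop : (c ++ l :: rest).drop (c.length + 1) = rest := by
        rw [show c ++ l :: rest = (c ++ [l]) ++ rest by simp,
          show c.length + 1 = (c ++ [l]).length by simp, List.drop_left]
      simp only [htake, if_neg hlen, hget, hdrop]
      rw [List.foldl_cons, show pvStepA (s, t, c) l =
        ((if c = [] then s else s ++ [(t, pvJoinStrip c)]), pvTitleOf l, []) by
          simp [pvStepA, hl]]
      rw [ih (pvTitleOf l) [] _ (by simp), List.nil_append]
    · rw [List.foldl_cons, show pvStepA (s, t, c) l = (s, t, c ++ [l]) by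
        simp [pvStepA, hl]]
      rw [ih t (c ++ [l]) s (by
        intro x hx
        rcases List.mem_append.mp hx with h | h
        · exact hc x h
        · simp at h; subst h; simpa using hl)]
      simp

-- ===== VERDICT (by name: the statement is the Claim_ definition above) =====
theorem split_content_sections_py_spec : Claim_equal_split_content_sections_py := by
  intro content _
  show split_content_sections_py content = split_content_sections_py_alt content
  unfold split_content_sections_py split_content_sections_py_alt
  rw [show pvFinishA = pvFinishB from rfl,
    ← List.nil_append (PySem.Str.splitlines content),
    ← pvLoop_eq (PySem.Str.splitlines content) "Section 1" [] [] (by simp)]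
  simp
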